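-- pv_equiv track=rewrite | github.com/zero-j96/Coding_Test | 프로그래머스/0/181837. 커피 심부름/커피 심부름.py | solution
-- ===== SOURCE A (Python) =====
-- def solution(order):
--     answer = 0
--     for i in range(len(order)):
--         if "latte" in order[i]:
--             answer += 5000
--         else:
--             answer += 4500
--     return answer
-- ===== SOURCE B (Python) =====
-- def solution(order):
--     # Divide and conquer over the index range [lo, hi): split at the midpoint,
--     # price a single order at the base case, and add the two halves.
--     def total(lo, hi):
--         if hi - lo <= 0:
--             return 0
--         if hi - lo == 1:
--             return 5000 if "latte" in order[lo] else 4500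
--         mid = (lo + hi) // 2
--         return total(lo, mid) + total(mid, hi)
--     return total(0, len(order))
-- ===== Notes on version B (the rewrite author's own statement) =====
-- stated objective: alternative
-- what changed: Replaces A's left-to-right accumulating loop with a divide-and-conquer recursion that splits the index range at the midpoint and adds the totals of the two halves (correct because addition is associative).
import Mathlib
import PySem

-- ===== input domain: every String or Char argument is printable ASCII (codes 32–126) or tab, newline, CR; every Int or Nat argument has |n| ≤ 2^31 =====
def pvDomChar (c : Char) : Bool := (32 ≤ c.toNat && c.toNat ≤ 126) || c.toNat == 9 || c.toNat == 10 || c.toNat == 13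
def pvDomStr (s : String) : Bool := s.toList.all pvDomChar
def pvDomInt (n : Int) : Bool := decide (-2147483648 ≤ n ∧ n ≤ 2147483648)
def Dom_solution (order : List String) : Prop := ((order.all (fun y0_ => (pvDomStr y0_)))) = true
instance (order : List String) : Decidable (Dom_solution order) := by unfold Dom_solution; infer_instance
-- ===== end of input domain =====

-- B replaces A's left-to-right accumulating loop with a divide-and-conquer
-- recursion over index ranges (alternative decomposition, same cost).


-- ===== PORT A =====
-- for i in range(len(order)): answer += 5000 if "latte" in order[i] else 4500
def solution (order : List String) : Int :=
  (PySem.List.pyRange 0 (order.length : Int) 1).foldl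
    (fun answer i =>
      if PySem.Str.isIn "latte" (PySem.List.pyGetD order i "") then answer + 5000
      else answer + 4500) 0

-- ===== PORT B =====
-- total(lo, hi): 0 if empty range; price of order[lo] if singleton;
-- else total(lo, mid) + total(mid, hi) with mid = (lo+hi)//2
def pvTotal (order : List String) (lo hi : Nat) : Int :=
  if hi - lo ≤ 0 then 0
  else if hi - lo = 1 then
    (if PySem.Str.isIn "latte" (PySem.List.pyGetD order (lo : Int) "") then 5000 else 4500)
  else
    pvTotal order lo ((lo + hi) / 2) + pvTotal order ((lo + hi) / 2) hi
termination_by hi - lo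
decreasing_by all_goals omega

def solution_alt (order : List String) : Int :=
  pvTotal order 0 order.length

-- ===== PRECONDITION & SPEC =====
def Spec_solution (order : List String) (out : Int) : Prop := out = solution_alt order
instance (order : List String) (out : Int) : Decidable (Spec_solution order out) := by unfold Spec_solution; infer_instance

-- ===== CLAIM =====
def Claim_equal_solution : Prop := ∀ (order : List String), Dom_solution order → Spec_solution order (solution order)

-- ===== LEMMAS AND PROOFS =====
def pvPrice (o : String) : Int := if PySem.Str.isIn "latte" o then 5000 else 4500

def pvPrefixSum (order : List String) (n : Nat) : Int :=
  ((order.take n).map pvPrice).sum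

theorem pvPrefixSum_succ (order : List String) (n : Nat) (h : n < order.length) :
    pvPrefixSum order (n + 1) = pvPrefixSum order n + pvPrice order[n] := by
  unfold pvPrefixSum
  rw [List.take_succ]
  simp [h]

theorem pvTotal_eq (order : List String) (k lo hi : Nat)
    (hk : hi - lo ≤ k) (hlh : lo ≤ hi) (hhi : hi ≤ order.length) :
    pvTotal order lo hi = pvPrefixSum order hi - pvPrefixSum order lo := by
  induction k generalizing lo hi with
  | zero =>
    have : hi = lo := by omega
    subst this
    rw [pvTotal]
    simp
  | succ k ih =>
    rw [pvTotal]
    by_cases h0 : hi - lo ≤ 0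
    · have : hi = lo := by omega
      subst this; simp
    · simp only [h0, if_false]
      by_cases h1 : hi - lo = 1
      · have hhi' : hi = lo + 1 := by omega
        have hlo : lo < order.length := by omega
        simp only [h1, if_true]
        rw [hhi', pvPrefixSum_succ order lo hlo]
        simp [pvPrice, PySem.List.pyGetD_natCast, List.getD_eq_getElem?_getD, hlo]
      · simp only [h1, if_false]
        have hmid1 : lo ≤ (lo + hi) / 2 := by omega
        have hmid2 : (lo + hi) / 2 ≤ hi := by omega
        rw [ih lo ((lo + hi) / 2) (by omega) hmid1 (by omega),
            ih ((lo + hi) / 2) hi (by omega) hmid2 hhi]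
        ring

theorem solution_foldl (order : List String) (acc : Int) :
    order.foldl (fun answer o =>
      if PySem.Str.isIn "latte" o then answer + 5000 else answer + 4500) acc
      = acc + (order.map pvPrice).sum := by
  induction order generalizing acc with
  | nil => simp
  | cons x xs ih =>
    simp only [List.foldl_cons, List.map_cons, List.sum_cons, ih, pvPrice]
    split_ifs with h <;> ring

-- ===== VERDICT =====
theorem solution_spec : Claim_equal_solution := by
  intro order _
  unfold Spec_solution solution solution_alt
  rw [PySem.List.foldl_pyRange_zero_pyGetD' order ""
      (fun answer o => if PySem.Str.isIn "latte" o then answer + 5000 else answer + 4500) 0,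
    solution_foldl,
    pvTotal_eq order order.length 0 order.length (by omega) (by omega) le_rfl]
  unfold pvPrefixSum
  simp
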